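-- pv_equiv track=rewrite | github.com/yllvar/Quant-Autoresearch | src/tools/bm25_search.py | _parse_research_context
-- ===== SOURCE A (Python) =====
-- from typing import Dict, Any, List, Optional
--
-- def _parse_research_context(context: str) -> List[Dict[str, Any]]:
--     """Parse research context to extract structured paper information"""
--     papers = []
--
--     lines = context.split('\n')
--     current_paper = {}
--
--     for line in lines:
--         line = line.strip()
--
--         if line.startswith("PAPER:"):
--             if current_paper:
--                 papers.append(current_paper)
--             current_paper = {"title": line[6:].strip()}
--
--         elif line.startswith("SUMMARY:"):
--             current_paper["summary"] = line[8:].strip()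
--
--         elif line.startswith("URL:"):
--             current_paper["url"] = line[4:].strip()
--
--         elif line.startswith("(") and line.endswith(")"):
--             # Extract publication date
--             current_paper["published"] = line[1:-1]
--
--     # Add the last paper if exists
--     if current_paper:
--         papers.append(current_paper)
--
--     return papers
-- ===== SOURCE B (Python) =====
-- def _parse_research_context(context):
--     """Two-pass rewrite: group stripped lines into segments at 'PAPER:' boundaries,
--     then convert each segment to a dict, keeping only non-empty dicts."""
--     def segments(lines):
--         segs = [[]]
--         for line in lines:
--             if line.startswith("PAPER:"):
--                 segs.append([line])
--             else:
--                 segs[-1].append(line)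
--         return segs
--
--     def to_dict(seg):
--         d = {}
--         for line in seg:
--             if line.startswith("PAPER:"):
--                 d["title"] = line[6:].strip()
--             elif line.startswith("SUMMARY:"):
--                 d["summary"] = line[8:].strip()
--             elif line.startswith("URL:"):
--                 d["url"] = line[4:].strip()
--             elif line.startswith("(") and line.endswith(")"):
--                 d["published"] = line[1:-1]
--         return d
--
--     stripped = [line.strip() for line in context.split('\n')]
--     return [d for d in (to_dict(seg) for seg in segments(stripped)) if d]
-- ===== Notes on version B (the rewrite author's own statement) =====
-- stated objective: alternative
-- what changed: Replaces the single stateful loop carrying (papers, current_paper) by two passes: first group the stripped lines into segments split at paper-marker lines, then map each segment to a dict and keep the non-empty ones.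
import Mathlib
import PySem

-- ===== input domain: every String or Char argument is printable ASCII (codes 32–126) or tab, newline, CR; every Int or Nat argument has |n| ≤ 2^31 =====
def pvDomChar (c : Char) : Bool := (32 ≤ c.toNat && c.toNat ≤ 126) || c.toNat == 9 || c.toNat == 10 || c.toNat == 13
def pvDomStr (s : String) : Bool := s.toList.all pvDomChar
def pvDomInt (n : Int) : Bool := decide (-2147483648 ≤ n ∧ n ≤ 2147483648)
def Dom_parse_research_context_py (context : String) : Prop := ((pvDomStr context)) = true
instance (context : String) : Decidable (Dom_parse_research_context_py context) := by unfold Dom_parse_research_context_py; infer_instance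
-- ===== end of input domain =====

-- B is an alternative decomposition: it groups the stripped lines into segments at paper-marker lines
-- and then converts each segment to a dict, instead of A's single loop carrying (papers, current_paper).

-- ===== PORT A =====
-- A's loop body, applied to the already-stripped line (state: papers so far, current_paper)
def pvBodyA (st : List (List (String × String)) × PySem.Dict String String) (line : String) :
    List (List (String × String)) × PySem.Dict String String :=
  if PySem.Str.startswith line "PAPER:" then
    ((if st.2.items = [] then st.1 else st.1 ++ [st.2.items]),
     PySem.Dict.insert PySem.Dict.empty "title" (PySem.Str.strip (PySem.Str.slice line (some 6) none)))
  else if PySem.Str.startswith line "SUMMARY:" then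
    (st.1, PySem.Dict.insert st.2 "summary" (PySem.Str.strip (PySem.Str.slice line (some 8) none)))
  else if PySem.Str.startswith line "URL:" then
    (st.1, PySem.Dict.insert st.2 "url" (PySem.Str.strip (PySem.Str.slice line (some 4) none)))
  else if PySem.Str.startswith line "(" && PySem.Str.endswith line ")" then
    (st.1, PySem.Dict.insert st.2 "published" (PySem.Str.slice line (some 1) (some (-1))))
  else st

-- A's trailing `if current_paper: papers.append(current_paper)`
def pvFinishA (st : List (List (String × String)) × PySem.Dict String String) :
    List (List (String × String)) :=
  if st.2.items = [] then st.1 else st.1 ++ [st.2.items]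

def parse_research_context_py (context : String) : List (List (String × String)) :=
  pvFinishA (((PySem.Str.split? context "\n").getD []).foldl
    (fun st line0 => pvBodyA st (PySem.Str.strip line0)) ([], PySem.Dict.empty))

-- ===== PORT B =====
-- Source B's `segments` loop body: segs.append([line]) / segs[-1].append(line)
def pvSegStep (segs : List (List String)) (line : String) : List (List String) :=
  if PySem.Str.startswith line "PAPER:" then segs ++ [[line]]
  else segs.dropLast ++ [segs.getLastD [] ++ [line]]

-- Source B's `to_dict` loop body
def pvField (d : PySem.Dict String String) (line : String) : PySem.Dict String String :=
  if PySem.Str.startswith line "PAPER:" then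
    PySem.Dict.insert d "title" (PySem.Str.strip (PySem.Str.slice line (some 6) none))
  else if PySem.Str.startswith line "SUMMARY:" then
    PySem.Dict.insert d "summary" (PySem.Str.strip (PySem.Str.slice line (some 8) none))
  else if PySem.Str.startswith line "URL:" then
    PySem.Dict.insert d "url" (PySem.Str.strip (PySem.Str.slice line (some 4) none))
  else if PySem.Str.startswith line "(" && PySem.Str.endswith line ")" then
    PySem.Dict.insert d "published" (PySem.Str.slice line (some 1) (some (-1)))
  else d

def pvToDict (seg : List String) : PySem.Dict String String :=
  seg.foldl pvField PySem.Dict.empty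

def parse_research_context_py_alt (context : String) : List (List (String × String)) :=
  ((((((PySem.Str.split? context "\n").getD []).map PySem.Str.strip).foldl pvSegStep
      [[]]).map (fun seg => (pvToDict seg).items)).filter (fun d => d ≠ []))

-- ===== PRECONDITION & SPEC =====
def Spec_parse_research_context_py (context : String) (out : List (List (String × String))) : Prop := out = parse_research_context_py_alt context
instance (context : String) (out : List (List (String × String))) : Decidable (Spec_parse_research_context_py context out) := by unfold Spec_parse_research_context_py; infer_instance

-- ===== CLAIM (what is proved, stated in full; the proofs are below) =====
def Claim_equal_parse_research_context_py : Prop := ∀ (context : String), Dom_parse_research_context_py context → Spec_parse_research_context_py context (parse_research_context_py context)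

-- ===== LEMMAS AND PROOFS =====

-- common recursive specification: the papers emitted from stripped lines `ls`, current dict `cur`
def pvSpec (cur : PySem.Dict String String) : List String → List (List (String × String))
  | [] => if cur.items = [] then [] else [cur.items]
  | l :: ls =>
    if PySem.Str.startswith l "PAPER:" then
      (if cur.items = [] then [] else [cur.items]) ++
        pvSpec (PySem.Dict.insert PySem.Dict.empty "title" (PySem.Str.strip (PySem.Str.slice l (some 6) none))) ls
    else
      pvSpec (pvField cur l) ls

theorem pvBodyA_paper (st : List (List (String × String)) × PySem.Dict String String)
    (l : String) (h : PySem.Str.startswith l "PAPER:" = true) :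
    pvBodyA st l = ((if st.2.items = [] then st.1 else st.1 ++ [st.2.items]),
      PySem.Dict.insert PySem.Dict.empty "title" (PySem.Str.strip (PySem.Str.slice l (some 6) none))) := by
  unfold pvBodyA; rw [if_pos h]

theorem pvBodyA_field (st : List (List (String × String)) × PySem.Dict String String)
    (l : String) (h : ¬ PySem.Str.startswith l "PAPER:" = true) :
    pvBodyA st l = (st.1, pvField st.2 l) := by
  unfold pvBodyA pvField
  rw [if_neg h, if_neg h]
  split_ifs <;> rfl

theorem pvA_spec (ls : List String) : ∀ (papers : List (List (String × String))) (cur : PySem.Dict String String),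
    pvFinishA (ls.foldl pvBodyA (papers, cur)) = papers ++ pvSpec cur ls := by
  induction ls with
  | nil =>
    intro papers cur
    simp only [List.foldl_nil, pvSpec, pvFinishA]
    split <;> simp
  | cons l ls ih =>
    intro papers cur
    rw [List.foldl_cons]
    by_cases h1 : PySem.Str.startswith l "PAPER:" = true
    · rw [pvBodyA_paper _ _ h1, ih]
      simp only [pvSpec, h1, if_true]
      split <;> simp
    · rw [pvBodyA_field _ _ h1, ih]
      simp only [pvSpec]
      rw [if_neg h1]

theorem pvSegStep_paper (segs : List (List String)) (l : String)
    (h : PySem.Str.startswith l "PAPER:" = true) : pvSegStep segs l = segs ++ [[l]] := by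
  unfold pvSegStep; rw [if_pos h]

theorem pvSegStep_field (segs : List (List String)) (s : List String) (l : String)
    (h : ¬ PySem.Str.startswith l "PAPER:" = true) :
    pvSegStep (segs ++ [s]) l = segs ++ [s ++ [l]] := by
  unfold pvSegStep; rw [if_neg h, List.dropLast_concat, List.getLastD_concat]

theorem pvSegStep_prefix (ls : List String) : ∀ (ss : List (List String)) (s : List String),
    ls.foldl pvSegStep (ss ++ [s]) = ss ++ ls.foldl pvSegStep [s] := by
  induction ls with
  | nil => intro ss s; simp
  | cons l ls ih =>
    intro ss s
    rw [List.foldl_cons, List.foldl_cons]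
    by_cases h1 : PySem.Str.startswith l "PAPER:" = true
    · rw [pvSegStep_paper _ _ h1, pvSegStep_paper [s] _ h1, List.append_assoc,
        ← List.append_assoc ss, ih (ss ++ [s]) [l],
        show ([s] ++ [[l]] : List (List String)) = [s] ++ [[l]] from rfl, ih [s] [l],
        List.append_assoc]
    · rw [pvSegStep_field _ _ _ h1,
        show ([s] : List (List String)) = [] ++ [s] from rfl, pvSegStep_field _ _ _ h1,
        List.nil_append, ih]

theorem pvToDict_paper (l : String) (h : PySem.Str.startswith l "PAPER:" = true) :
    pvToDict [l] = PySem.Dict.insert PySem.Dict.empty "title"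
      (PySem.Str.strip (PySem.Str.slice l (some 6) none)) := by
  show pvField PySem.Dict.empty l = _
  unfold pvField; rw [if_pos h]

theorem pvToDict_snoc (s : List String) (l : String) :
    pvToDict (s ++ [l]) = pvField (pvToDict s) l := by
  simp [pvToDict, List.foldl_append]

theorem pvB_spec (ls : List String) : ∀ (s : List String),
    ((ls.foldl pvSegStep [s]).map (fun seg => (pvToDict seg).items)).filter (fun d => d ≠ []) =
      pvSpec (pvToDict s) ls := by
  induction ls with
  | nil =>
    intro s
    by_cases h : (pvToDict s).items = [] <;>
      simp [List.filter, pvSpec, h]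
  | cons l ls ih =>
    intro s
    rw [List.foldl_cons]
    by_cases h1 : PySem.Str.startswith l "PAPER:" = true
    · rw [pvSegStep_paper _ _ h1, pvSegStep_prefix, List.map_append, List.filter_append, ih,
        pvToDict_paper _ h1]
      simp only [pvSpec, h1, if_true]
      congr 1
      by_cases h : (pvToDict s).items = [] <;> simp [List.filter, h]
    · rw [show ([s] : List (List String)) = [] ++ [s] from rfl, pvSegStep_field _ _ _ h1,
        List.nil_append, ih, pvToDict_snoc]
      simp only [pvSpec]
      rw [if_neg h1]

-- ===== VERDICT (by name: the statement is the Claim_ definition above) =====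
theorem parse_research_context_py_spec : Claim_equal_parse_research_context_py := by
  intro context _
  unfold Spec_parse_research_context_py parse_research_context_py parse_research_context_py_alt
  rw [← List.foldl_map, pvA_spec, pvB_spec]
  simp [pvToDict]
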